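-- pv_equiv track=rewrite | github.com/yowatanabe/learn-to-code | python/266/main.py | earliest_full_connection
-- ===== SOURCE A (Python) =====
-- from typing import List
--
-- class UnionFind:
--     def __init__(self, n: int) -> None:
--         self.parent = list(range(n))
--         self.size = [1] * n
--         self.components = n  # 連結成分の数
--
--     def find(self, x: int) -> int:
--         # 経路圧縮
--         if self.parent[x] != x:
--             self.parent[x] = self.find(self.parent[x])
--         return self.parent[x]
--
--     def union(self, a: int, b: int) -> bool:
--         """
--         a と b の属する集合をマージする。
--         もともと同じ集合なら False、
--         新しくマージされたなら True を返す。
--         """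
--         ra = self.find(a)
--         rb = self.find(b)
--         if ra == rb:
--             return False
--
--         # union by size（大きい方に小さい方をぶら下げる）
--         if self.size[ra] < self.size[rb]:
--             ra, rb = rb, ra
--         self.parent[rb] = ra
--         self.size[ra] += self.size[rb]
--         self.components -= 1
--         return True
--
-- def earliest_full_connection(n: int, logs: List[List[int]]) -> int:
--     """
--     n台のサーバと接続ログlogsから、全サーバが1つの連結成分になる
--     最初の時刻を返す。ならなければ -1。
--     """
--     # サーバ1台なら最初から「全接続」とみなす
--     if n <= 1:
--         return 0
--
--     # time昇順でソート
--     logs.sort(key=lambda x: x[0])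
--
--     uf = UnionFind(n)
--
--     for time, a, b in logs:
--         merged = uf.union(a, b)
--         if merged and uf.components == 1:
--             return time
--
--     return -1
-- ===== SOURCE B (Python) =====
-- from typing import List
--
-- def earliest_full_connection(n: int, logs: List[List[int]]) -> int:
--     # Flat relabeling instead of union-find: label[i] is the component label of
--     # server i; merging two components rewrites every occurrence of the losing
--     # label.  Sorts logs in place, like the original.
--     if n <= 1:
--         return 0
--
--     logs.sort(key=lambda x: x[0])
--
--     label = list(range(n))
--     components = n
--
--     for time, a, b in logs:
--         la = label[a]
--         lb = label[b]
--         if la == lb: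
--             continue
--         label = [la if v == lb else v for v in label]
--         components -= 1
--         if components == 1:
--             return time
--
--     return -1
-- ===== Notes on version B (the rewrite author's own statement) =====
-- stated objective: simpler
-- what changed: Replaces the UnionFind class (parent array, union by size, recursive find with path compression) by a flat label array: each server carries a component label, a merge rewrites every occurrence of the losing label in one comprehension, and a counter detects full connectivity; no find, no ranks, no class.
import Mathlib
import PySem

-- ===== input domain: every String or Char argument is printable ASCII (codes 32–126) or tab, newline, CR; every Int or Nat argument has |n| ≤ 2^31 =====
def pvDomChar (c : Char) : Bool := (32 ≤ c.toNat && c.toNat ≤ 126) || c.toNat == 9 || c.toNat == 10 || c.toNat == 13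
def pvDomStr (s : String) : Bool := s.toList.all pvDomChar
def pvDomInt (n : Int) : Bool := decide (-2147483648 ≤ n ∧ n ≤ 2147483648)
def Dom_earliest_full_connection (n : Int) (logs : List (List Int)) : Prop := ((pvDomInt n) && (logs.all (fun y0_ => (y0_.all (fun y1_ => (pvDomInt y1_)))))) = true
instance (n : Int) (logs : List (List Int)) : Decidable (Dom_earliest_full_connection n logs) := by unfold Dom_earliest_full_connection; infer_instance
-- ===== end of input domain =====

-- B replaces A's UnionFind (parent array, union by size, path compression) by a flat
-- component-label array merged by relabeling; objective: simpler.  Both A and B sort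
-- `logs` in place; the equivalence proved here is about the return value.

-- ===== PORT A =====
-- UnionFind.find with path compression; fuel (= len(parent)) only makes the
-- Python recursion structural — it never runs out on the forests A builds.
def ufFind : Nat → List Int → Int → Int × List Int
  | 0, p, x => (x, p)
  | fuel+1, p, x =>
    let px := PySem.List.pyGetD p x 0
    if px ≠ x then
      let f := ufFind fuel p px
      (f.1, PySem.List.pySetD f.2 x f.1)
    else (px, p)

-- UnionFind.union on state (parent, size, components); returns (merged, parent', size', components')
def ufUnion (p s : List Int) (c a b : Int) : Bool × List Int × List Int × Int :=
  let fa := ufFind p.length p a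
  let fb := ufFind fa.2.length fa.2 b
  let p2 := fb.2
  if fa.1 = fb.1 then (false, p2, s, c)
  else
    let ra := if PySem.List.pyGetD s fa.1 0 < PySem.List.pyGetD s fb.1 0 then fb.1 else fa.1
    let rb := if PySem.List.pyGetD s fa.1 0 < PySem.List.pyGetD s fb.1 0 then fa.1 else fb.1
    (true, PySem.List.pySetD p2 rb ra,
     PySem.List.pySetD s ra (PySem.List.pyGetD s ra 0 + PySem.List.pyGetD s rb 0), c - 1)

-- 'for time, a, b in logs: …'
def ufLoop : List (List Int) → List Int → List Int → Int → Int
  | [], _, _, _ => -1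
  | l :: rest, p, s, c =>
    let t := PySem.List.pyGetD l 0 0
    let a := PySem.List.pyGetD l 1 0
    let b := PySem.List.pyGetD l 2 0
    let u := ufUnion p s c a b
    if u.1 = true ∧ u.2.2.2 = 1 then t else ufLoop rest u.2.1 u.2.2.1 u.2.2.2

def earliest_full_connection (n : Int) (logs : List (List Int)) : Int :=
  if n ≤ 1 then 0
  else
    ufLoop (PySem.List.sorted logs (fun x => PySem.List.pyGetD x 0 0) false)
      (PySem.List.pyRange 0 n 1) (PySem.List.pyRepeat [1] n) n

-- ===== PORT B =====
-- 'for time, a, b in logs: …' over the flat label array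
def relabelLoop : List (List Int) → List Int → Int → Int
  | [], _, _ => -1
  | l :: rest, label, c =>
    let t := PySem.List.pyGetD l 0 0
    let a := PySem.List.pyGetD l 1 0
    let b := PySem.List.pyGetD l 2 0
    let la := PySem.List.pyGetD label a 0
    let lb := PySem.List.pyGetD label b 0
    if la = lb then relabelLoop rest label c
    else
      let label' := label.map (fun v => if v = lb then la else v)
      if c - 1 = 1 then t else relabelLoop rest label' (c - 1)

def earliest_full_connection_alt (n : Int) (logs : List (List Int)) : Int :=
  if n ≤ 1 then 0
  else
    relabelLoop (PySem.List.sorted logs (fun x => PySem.List.pyGetD x 0 0) false)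
      (PySem.List.pyRange 0 n 1) n

-- ===== PRECONDITION & SPEC =====
-- Pre_ admits exactly the inputs on which the Python A returns normally: when n ≥ 2,
-- every log entry must be a 3-element list (unpacking 'time, a, b' raises ValueError
-- otherwise) whose endpoints are valid Python indices into the n-element parent list,
-- i.e. lie in [-n, n) (IndexError otherwise).  Negative in-range indices are admitted.
def Pre_earliest_full_connection (n : Int) (logs : List (List Int)) : Prop :=
  n ≤ 1 ∨ ∀ l ∈ logs, l.length = 3 ∧
    -n ≤ l.getD 1 0 ∧ l.getD 1 0 < n ∧ -n ≤ l.getD 2 0 ∧ l.getD 2 0 < n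
instance (n : Int) (logs : List (List Int)) : Decidable (Pre_earliest_full_connection n logs) := by
  unfold Pre_earliest_full_connection; infer_instance

def pvWitness_earliest_full_connection : Int × List (List Int) := (3, [[5, 0, 1], [2, 1, 2]])

def Spec_earliest_full_connection (n : Int) (logs : List (List Int)) (out : Int) : Prop := out = earliest_full_connection_alt n logs
instance (n : Int) (logs : List (List Int)) (out : Int) : Decidable (Spec_earliest_full_connection n logs out) := by unfold Spec_earliest_full_connection; infer_instance

-- ===== CLAIM (what is proved, stated in full; the proofs are below) =====
def Claim_equal_earliest_full_connection : Prop := ∀ (n : Int) (logs : List (List Int)), Dom_earliest_full_connection n logs → Pre_earliest_full_connection n logs → Spec_earliest_full_connection n logs (earliest_full_connection n logs)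

-- ===== LEMMAS AND PROOFS =====

-- abstraction layer: parent/label entry at an Int index
def pvVal (p : List Int) (x : Int) : Int := PySem.List.pyGetD p x 0
def pvInR (N : Nat) (x : Int) : Prop := 0 ≤ x ∧ x < (N : Int)
def pvWrap (N : Nat) (x : Int) : Int := if x < 0 then x + (N : Int) else x

-- 'x's chain of parents ends at root r'
inductive pvRootsTo (p : List Int) : Int → Int → Prop
  | root (x : Int) (h : pvVal p x = x) : pvRootsTo p x x
  | step (x r : Int) (h : pvVal p x ≠ x) (h2 : pvRootsTo p (pvVal p x) r) : pvRootsTo p x r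

def pvGood (N : Nat) (p : List Int) : Prop :=
  p.length = N ∧ ∀ x : Int, pvInR N x → pvInR N (pvVal p x)
def pvRank (N : Nat) (p : List Int) (ρ : Int → Nat) : Prop :=
  ∀ x : Int, pvInR N x → pvVal p x ≠ x → ρ (pvVal p x) < ρ x
-- simulation invariant: parent forest p and label array represent the same partition
def pvSim (N : Nat) (p label : List Int) : Prop :=
  pvGood N p ∧ (∃ ρ, pvRank N p ρ) ∧ label.length = N ∧
  ∀ x y : Int, pvInR N x → pvInR N y →
    ((∃ q, pvRootsTo p x q ∧ pvRootsTo p y q) ↔ pvVal label x = pvVal label y)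

theorem pvVal_wrap (p : List Int) (N : Nat) (x : Int) (hlen : p.length = N)
    (h1 : -(N:Int) ≤ x) (h2 : x < 0) : pvVal p x = pvVal p (x + N) := by
  unfold pvVal PySem.List.pyGetD PySem.List.pyGet? PySem.List.pyIdx?
  subst hlen
  have h3 : ¬ (0 ≤ x) := by omega
  have h4 : 0 ≤ x + (p.length : Int) := by omega
  have h5 : x + (p.length : Int) < (p.length : Int) := by omega
  have h6 : p.length - (-x).toNat = (x + (p.length:Int)).toNat := by omega
  simp only [h3, if_false, h1, if_true, h4, h5, h6]

theorem pySetD_wrap (p : List Int) (N : Nat) (x : Int) (v : Int) (hlen : p.length = N)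
    (h1 : -(N:Int) ≤ x) (h2 : x < 0) :
    PySem.List.pySetD p x v = PySem.List.pySetD p (x + N) v := by
  unfold PySem.List.pySetD PySem.List.pySet? PySem.List.pyIdx?
  subst hlen
  have h3 : ¬ (0 ≤ x) := by omega
  have h4 : 0 ≤ x + (p.length : Int) := by omega
  have h5 : x + (p.length : Int) < (p.length : Int) := by omega
  have h6 : p.length - (-x).toNat = (x + (p.length:Int)).toNat := by omega
  simp only [h3, if_false, h1, if_true, h4, h5, h6]

theorem pvVal_set (p : List Int) (N : Nat) (y z v : Int) (hlen : p.length = N)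
    (hy : pvInR N y) (hz : pvInR N z) :
    pvVal (PySem.List.pySetD p y v) z = if z = y then v else pvVal p z := by
  obtain ⟨hy1, hy2⟩ := hy
  obtain ⟨hz1, hz2⟩ := hz
  unfold pvVal
  rw [PySem.List.pySetD_of_nonneg _ _ hy1]
  rw [PySem.List.pyGetD_eq_getElem _ _ hz1 (by simp; omega),
      PySem.List.pyGetD_eq_getElem _ _ hz1 (by omega)]
  rw [List.getElem_set]
  by_cases h : z = y
  · have : y.toNat = z.toNat := by omega
    simp [h, this]
  · have : ¬ (y.toNat = z.toNat) := by omega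
    simp [h, this]

theorem length_pySetD' (p : List Int) (y v : Int) :
    (PySem.List.pySetD p y v).length = p.length := by
  unfold PySem.List.pySetD PySem.List.pySet?
  rcases h : PySem.List.pyIdx? p.length y with _ | k <;> simp

theorem pvRootsTo_unique {p : List Int} {x q q' : Int}
    (h : pvRootsTo p x q) (h' : pvRootsTo p x q') : q = q' := by
  induction h generalizing q' with
  | root x hx =>
    cases h' with
    | root _ _ => rfl
    | step _ _ h _ => exact absurd hx h
  | step x r hx _ ih =>
    cases h' with
    | root _ h => exact absurd h hx
    | step _ _ _ h2 => exact ih h2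

theorem pvRootsTo_exists {N : Nat} {p : List Int} {ρ : Int → Nat}
    (hg : pvGood N p) (hr : pvRank N p ρ) {x : Int} (hx : pvInR N x) :
    ∃ q, pvRootsTo p x q := by
  have key : ∀ k (x : Int), pvInR N x → ρ x ≤ k → ∃ q, pvRootsTo p x q := by
    intro k
    induction k with
    | zero =>
      intro x hx hk
      by_cases h : pvVal p x = x
      · exact ⟨x, .root x h⟩
      · exact absurd (hr x hx h) (by omega)
    | succ k ih =>
      intro x hx hk
      by_cases h : pvVal p x = x
      · exact ⟨x, .root x h⟩
      · obtain ⟨q, hq⟩ := ih (pvVal p x) (hg.2 x hx) (by have := hr x hx h; omega)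
        exact ⟨q, .step x q h hq⟩
  exact key (ρ x) x hx le_rfl

theorem pvRootsTo_inR {N : Nat} {p : List Int} (hg : pvGood N p) {x q : Int}
    (hx : pvInR N x) (h : pvRootsTo p x q) : pvInR N q := by
  induction h with
  | root x h => exact hx
  | step x r h h2 ih => exact ih (hg.2 x hx)

theorem pvRootsTo_fix {p : List Int} {x q : Int} (h : pvRootsTo p x q) : pvVal p q = q := by
  induction h with
  | root x h => exact h
  | step x r h h2 ih => exact ih

theorem pvRootsTo_rank_lt {N : Nat} {p : List Int} {ρ : Int → Nat}
    (hg : pvGood N p) (hr : pvRank N p ρ) {x q : Int} (hx : pvInR N x)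
    (h : pvRootsTo p x q) (hne : x ≠ q) : ρ q < ρ x := by
  induction h with
  | root x h => exact absurd rfl hne
  | step x r h h2 ih =>
    by_cases hxr : pvVal p x = r
    · subst hxr; exact hr x hx h
    · exact lt_trans (ih (hg.2 x hx) hxr) (hr x hx h)

theorem pvRootsTo_of_step {p : List Int} {x q : Int} (h : pvVal p x ≠ x) :
    pvRootsTo p x q ↔ pvRootsTo p (pvVal p x) q := by
  constructor
  · intro hh
    cases hh with
    | root _ h2 => exact absurd h2 h
    | step _ _ _ h2 => exact h2
  · intro hh
    exact .step _ _ h hh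

-- path-compression write: setting p[y] := (y's root) preserves roots, goodness, rank
theorem pvCompress {N : Nat} {p : List Int} {ρ : Int → Nat} {y r : Int}
    (hg : pvGood N p) (hr : pvRank N p ρ) (hy : pvInR N y) (hroot : pvRootsTo p y r) :
    pvGood N (PySem.List.pySetD p y r) ∧ pvRank N (PySem.List.pySetD p y r) ρ ∧
    ∀ z q, pvInR N z → (pvRootsTo (PySem.List.pySetD p y r) z q ↔ pvRootsTo p z q) := by
  have hrinR : pvInR N r := pvRootsTo_inR hg hy hroot
  have hval : ∀ z : Int, pvInR N z →
      pvVal (PySem.List.pySetD p y r) z = if z = y then r else pvVal p z :=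
    fun z hz => pvVal_set p N y z r hg.1 hy hz
  have hgood : pvGood N (PySem.List.pySetD p y r) := by
    refine ⟨by rw [length_pySetD' p y r]; exact hg.1, ?_⟩
    intro z hz
    rw [hval z hz]
    split
    · exact hrinR
    · exact hg.2 z hz
  have hrank : pvRank N (PySem.List.pySetD p y r) ρ := by
    intro z hz hne
    rw [hval z hz] at hne ⊢
    by_cases hzy : z = y
    · subst hzy
      rw [if_pos rfl] at hne ⊢
      exact pvRootsTo_rank_lt hg hr hz hroot (fun h => hne h.symm)
    · rw [if_neg hzy] at hne ⊢
      exact hr z hz hne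
  have hfwd : ∀ z q, pvRootsTo p z q → pvInR N z → pvRootsTo (PySem.List.pySetD p y r) z q := by
    intro z q hzq
    induction hzq with
    | root w hw =>
      intro hw'
      by_cases hwy : w = y
      · subst hwy
        have hry : r = w := pvRootsTo_unique hroot (.root w hw)
        exact .root w (by rw [hval w hw', if_pos rfl, hry])
      · exact .root w (by rw [hval w hw', if_neg hwy]; exact hw)
    | step w q hw h2 ih =>
      intro hw'
      by_cases hwy : w = y
      · have hq : q = r := pvRootsTo_unique (.step w q hw h2) (hwy ▸ hroot)
        rw [hq]
        have hvw : pvVal (PySem.List.pySetD p y r) w = r := by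
          rw [hval w hw', if_pos hwy]
        have hvr : pvVal (PySem.List.pySetD p y r) r = r := by
          rw [hval r hrinR]
          split
          · rfl
          · exact pvRootsTo_fix hroot
        by_cases hrw : r = w
        · subst hrw
          exact .root _ hvw
        · refine .step w r (by rw [hvw]; exact hrw) ?_
          rw [hvw]
          exact .root r hvr
      · have hvw : pvVal (PySem.List.pySetD p y r) w = pvVal p w := by
          rw [hval w hw', if_neg hwy]
        refine .step w q (by rw [hvw]; exact hw) ?_
        rw [hvw]
        exact ih (hg.2 w hw')
  refine ⟨hgood, hrank, fun z q hz => ⟨fun h' => ?_, fun h => hfwd z q h hz⟩⟩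
  obtain ⟨q0, h0⟩ := pvRootsTo_exists hg hr hz
  have := hfwd z q0 h0 hz
  have hq : q = q0 := pvRootsTo_unique h' this
  exact hq ▸ h0

-- the fuel induction for find, on in-range x
theorem ufFind_go {N : Nat} (ρ : Int → Nat) :
    ∀ (fuel : Nat) (p : List Int) (x : Int), pvGood N p → pvRank N p ρ → pvInR N x →
    ((Finset.Ico (0:Int) (N:Int)).filter (fun y => ρ y < ρ x)).card < fuel →
    pvRootsTo p x (ufFind fuel p x).1 ∧ pvGood N (ufFind fuel p x).2 ∧
    pvRank N (ufFind fuel p x).2 ρ ∧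
    ∀ z q, pvInR N z → (pvRootsTo (ufFind fuel p x).2 z q ↔ pvRootsTo p z q) := by
  intro fuel
  induction fuel with
  | zero =>
    intro p x _ _ _ hcard
    exact absurd hcard (Nat.not_lt_zero _)
  | succ fuel ih =>
    intro p x hg hr hx hcard
    by_cases h : pvVal p x = x
    · have heq : ufFind (fuel + 1) p x = (pvVal p x, p) := by
        simp [ufFind, pvVal] at h ⊢
        simp [h]
      rw [heq]
      refine ⟨by simpa [h] using pvRootsTo.root x h, hg, hr, fun z q _ => Iff.rfl⟩
    · have hpx : pvInR N (pvVal p x) := hg.2 x hx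
      have hstep : ρ (pvVal p x) < ρ x := hr x hx h
      have hmem : pvVal p x ∈ (Finset.Ico (0:Int) (N:Int)).filter (fun y => ρ y < ρ x) := by
        simp [Finset.mem_filter, Finset.mem_Ico]
        exact ⟨⟨hpx.1, hpx.2⟩, hstep⟩
      have hsub : (Finset.Ico (0:Int) (N:Int)).filter (fun y => ρ y < ρ (pvVal p x)) ⊆
          ((Finset.Ico (0:Int) (N:Int)).filter (fun y => ρ y < ρ x)).erase (pvVal p x) := by
        intro y hy
        rw [Finset.mem_filter, Finset.mem_Ico] at hy
        rw [Finset.mem_erase, Finset.mem_filter, Finset.mem_Ico]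
        have h2 := hy.2
        exact ⟨by intro hc; rw [hc] at h2; omega, hy.1, by omega⟩
      have hcard' : ((Finset.Ico (0:Int) (N:Int)).filter (fun y => ρ y < ρ (pvVal p x))).card < fuel := by
        have h1 := Finset.card_le_card hsub
        have h2 := Finset.card_erase_of_mem hmem
        have h3 := Finset.card_pos.2 ⟨_, hmem⟩
        omega
      obtain ⟨ih1, ih2, ih3, ih4⟩ := ih p (pvVal p x) hg hr hpx hcard'
      have hrx : pvRootsTo p x (ufFind fuel p (pvVal p x)).1 := .step x _ h ih1
      have hrx2 : pvRootsTo (ufFind fuel p (pvVal p x)).2 x (ufFind fuel p (pvVal p x)).1 :=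
        (ih4 x _ hx).2 hrx
      obtain ⟨hc1, hc2, hc3⟩ := pvCompress ih2 ih3 hx hrx2
      have heq : ufFind (fuel + 1) p x =
          ((ufFind fuel p (pvVal p x)).1,
            PySem.List.pySetD (ufFind fuel p (pvVal p x)).2 x (ufFind fuel p (pvVal p x)).1) := by
        simp only [ufFind, pvVal] at h ⊢
        rw [if_pos h]
      rw [heq]
      refine ⟨hrx, hc1, hc2, fun z q hz => ?_⟩
      rw [hc3 z q hz, ih4 z q hz]

-- find with fuel N on any admitted index (including negative, which Python wraps)
theorem ufFind_spec {N : Nat} {ρ : Int → Nat} {p : List Int} {x : Int}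
    (h2 : 2 ≤ N) (hg : pvGood N p) (hr : pvRank N p ρ)
    (hx1 : -(N:Int) ≤ x) (hx2 : x < N) :
    pvRootsTo p (pvWrap N x) (ufFind N p x).1 ∧ pvGood N (ufFind N p x).2 ∧
    pvRank N (ufFind N p x).2 ρ ∧
    ∀ z q, pvInR N z → (pvRootsTo (ufFind N p x).2 z q ↔ pvRootsTo p z q) := by
  have hcardIco : (Finset.Ico (0:Int) (N:Int)).card = N := by
    rw [Int.card_Ico]
    omega
  by_cases hneg : x < 0
  · -- negative index: Python wraps to x + N
    have hwrap : pvWrap N x = x + N := if_pos hneg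
    have hxhat : pvInR N (x + N) := ⟨by omega, by omega⟩
    have hvx : pvVal p x = pvVal p (x + N) := pvVal_wrap p N x hg.1 hx1 hneg
    obtain ⟨m, rfl⟩ : ∃ m, N = m + 1 := ⟨N - 1, by omega⟩
    have hne : pvVal p x ≠ x := by
      have := (hg.2 (x + (m+1:Nat)) hxhat).1
      rw [hvx]
      omega
    have heq : ufFind (m+1) p x =
        ((ufFind m p (pvVal p x)).1,
          PySem.List.pySetD (ufFind m p (pvVal p x)).2 x (ufFind m p (pvVal p x)).1) := by
      simp only [ufFind, pvVal] at hne ⊢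
      rw [if_pos hne]
    by_cases hroot : pvVal p (x + (m+1:Nat)) = x + (m+1:Nat)
    · -- the wrapped node is already a root
      obtain ⟨k, rfl⟩ : ∃ k, m = k + 1 := ⟨m - 1, by omega⟩
      have heq2 : ufFind (k+1) p (pvVal p x) = (pvVal p x, p) := by
        have : pvVal p (pvVal p x) = pvVal p x := by rw [hvx, hroot]; exact hroot
        simp only [ufFind, pvVal] at this ⊢
        simp [this]
      rw [heq, heq2]
      have hset : PySem.List.pySetD p x (pvVal p x) =
          PySem.List.pySetD p (x + (k+1+1:Nat)) (pvVal p x) :=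
        pySetD_wrap p _ x _ hg.1 hx1 hneg
      have hrt : pvRootsTo p (x + (k+1+1:Nat)) (pvVal p x) := by
        rw [hvx, hroot]
        exact .root _ hroot
      obtain ⟨hc1, hc2, hc3⟩ := pvCompress hg hr hxhat hrt
      rw [hwrap]
      simp only [hset]
      refine ⟨by rw [hvx, hroot]; exact .root _ hroot, hc1, hc2, hc3⟩
    · -- one real step to the wrapped node's parent, then the in-range machinery
      have hpx : pvInR (m+1) (pvVal p x) := by rw [hvx]; exact hg.2 _ hxhat
      have hstep : ρ (pvVal p x) < ρ (x + (m+1:Nat)) := by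
        rw [hvx]
        exact hr _ hxhat hroot
    -- card bound: the filter misses both (pvVal p x) and (x + N)
      have hmem1 : pvVal p x ∈ Finset.Ico (0:Int) ((m+1:Nat):Int) := by
        rw [Finset.mem_Ico]; exact ⟨hpx.1, hpx.2⟩
      have hmem2 : (x + ((m+1:Nat):Int)) ∈ (Finset.Ico (0:Int) ((m+1:Nat):Int)).erase (pvVal p x) := by
        rw [Finset.mem_erase, Finset.mem_Ico]
        refine ⟨?_, hxhat.1, hxhat.2⟩
        intro hc
        rw [← hc] at hstep
        omega
      have hsub : (Finset.Ico (0:Int) ((m+1:Nat):Int)).filter (fun y => ρ y < ρ (pvVal p x)) ⊆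
          ((Finset.Ico (0:Int) ((m+1:Nat):Int)).erase (pvVal p x)).erase (x + ((m+1:Nat):Int)) := by
        intro y hy
        rw [Finset.mem_filter, Finset.mem_Ico] at hy
        rw [Finset.mem_erase, Finset.mem_erase, Finset.mem_Ico]
        have h2 := hy.2
        refine ⟨by intro hc; rw [hc] at h2; omega, by intro hc; rw [hc] at h2; omega, hy.1⟩
      have hcard : ((Finset.Ico (0:Int) ((m+1:Nat):Int)).filter (fun y => ρ y < ρ (pvVal p x))).card < m := by
        have h1 := Finset.card_le_card hsub
        have h2 := Finset.card_erase_of_mem hmem2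
        have h3 := Finset.card_erase_of_mem hmem1
        have h4 := Finset.card_pos.2 ⟨_, hmem1⟩
        have h5 := Finset.card_pos.2 ⟨_, hmem2⟩
        omega
      obtain ⟨ih1, ih2, ih3, ih4⟩ := ufFind_go ρ m p (pvVal p x) hg hr hpx hcard
      have hrt : pvRootsTo p (x + ((m+1:Nat):Int)) (ufFind m p (pvVal p x)).1 := by
        refine .step _ _ hroot ?_
        rw [← hvx]
        exact ih1
      have hrt2 : pvRootsTo (ufFind m p (pvVal p x)).2 (x + ((m+1:Nat):Int)) (ufFind m p (pvVal p x)).1 :=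
        (ih4 _ _ hxhat).2 hrt
      obtain ⟨hc1, hc2, hc3⟩ := pvCompress ih2 ih3 hxhat hrt2
      have hset : PySem.List.pySetD (ufFind m p (pvVal p x)).2 x (ufFind m p (pvVal p x)).1 =
          PySem.List.pySetD (ufFind m p (pvVal p x)).2 (x + ((m+1:Nat):Int)) (ufFind m p (pvVal p x)).1 :=
        pySetD_wrap _ _ x _ ih2.1 (by omega) hneg
      rw [heq, hwrap]
      simp only [hset]
      exact ⟨hrt, hc1, hc2, fun z q hz => (hc3 z q hz).trans (ih4 z q hz)⟩
  · -- nonnegative index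
    have hwrap : pvWrap N x = x := if_neg hneg
    have hxin : pvInR N x := ⟨by omega, hx2⟩
    have hmem : x ∈ Finset.Ico (0:Int) (N:Int) := by rw [Finset.mem_Ico]; exact ⟨by omega, hx2⟩
    have hsub : (Finset.Ico (0:Int) (N:Int)).filter (fun y => ρ y < ρ x) ⊆
        (Finset.Ico (0:Int) (N:Int)).erase x := by
      intro y hy
      rw [Finset.mem_filter, Finset.mem_Ico] at hy
      rw [Finset.mem_erase, Finset.mem_Ico]
      have h2 := hy.2
      exact ⟨by intro hc; rw [hc] at h2; omega, hy.1⟩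
    have hcard : ((Finset.Ico (0:Int) (N:Int)).filter (fun y => ρ y < ρ x)).card < N := by
      have h1 := Finset.card_le_card hsub
      have h2 := Finset.card_erase_of_mem hmem
      have h3 := Finset.card_pos.2 ⟨_, hmem⟩
      omega
    rw [hwrap]
    exact ufFind_go ρ N p x hg hr hxin hcard

-- linking two distinct roots: the new root function collapses rb into ra
theorem pvLink {N : Nat} {p : List Int} {ρ : Int → Nat} {ra rb : Int}
    (hg : pvGood N p) (hr : pvRank N p ρ) (hra : pvInR N ra) (hrb : pvInR N rb)
    (hfa : pvVal p ra = ra) (hfb : pvVal p rb = rb) (hne : ra ≠ rb) :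
    pvGood N (PySem.List.pySetD p rb ra) ∧ (∃ ρ', pvRank N (PySem.List.pySetD p rb ra) ρ') ∧
    ∀ z q2, pvInR N z → pvRootsTo p z q2 →
      ∀ q, (pvRootsTo (PySem.List.pySetD p rb ra) z q ↔ q = (if q2 = rb then ra else q2)) := by
  classical
  have hval : ∀ z : Int, pvInR N z →
      pvVal (PySem.List.pySetD p rb ra) z = if z = rb then ra else pvVal p z :=
    fun z hz => pvVal_set p N rb z ra hg.1 hrb hz
  have hgood : pvGood N (PySem.List.pySetD p rb ra) := by
    refine ⟨by rw [length_pySetD']; exact hg.1, ?_⟩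
    intro z hz
    rw [hval z hz]
    split
    · exact hra
    · exact hg.2 z hz
  have hnotrarb : ¬ pvRootsTo p ra rb := by
    intro hc
    exact hne (pvRootsTo_unique (.root ra hfa) hc)
  have hrank : ∃ ρ', pvRank N (PySem.List.pySetD p rb ra) ρ' := by
    refine ⟨fun z => ρ z + (if pvRootsTo p z rb then ρ ra + 1 else 0), ?_⟩
    intro z hz hne'
    beta_reduce
    rw [hval z hz] at hne' ⊢
    by_cases hzrb : z = rb
    · subst hzrb
      rw [if_pos rfl] at hne' ⊢
      rw [if_neg hnotrarb, if_pos (pvRootsTo.root _ hfb)]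
      omega
    · rw [if_neg hzrb] at hne' ⊢
      have hbase := hr z hz hne'
      have hiff : pvRootsTo p z rb ↔ pvRootsTo p (pvVal p z) rb := pvRootsTo_of_step hne'
      split_ifs with h1 h2 h3
      · omega
      · exact (h2 (hiff.2 h1)).elim
      · exact (h1 (hiff.1 h3)).elim
      · omega
  have hfwd : ∀ z q2, pvRootsTo p z q2 → pvInR N z →
      pvRootsTo (PySem.List.pySetD p rb ra) z (if q2 = rb then ra else q2) := by
    intro z q2 hzq
    induction hzq with
    | root w hw =>
      intro hw'
      by_cases hwrb : w = rb
      · rw [if_pos hwrb]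
        refine .step w ra (by rw [hval w hw', if_pos hwrb]; exact fun h => hne (h.trans hwrb)) ?_
        rw [hval w hw', if_pos hwrb]
        refine .root ra ?_
        rw [hval ra hra, if_neg hne]
        exact hfa
      · rw [if_neg hwrb]
        exact .root w (by rw [hval w hw', if_neg hwrb]; exact hw)
    | step w q2 hw h2 ih =>
      intro hw'
      have hwrb : w ≠ rb := by
        intro hc
        rw [hc, hfb] at hw
        exact hw rfl
      refine .step w _ (by rw [hval w hw', if_neg hwrb]; exact hw) ?_
      rw [hval w hw', if_neg hwrb]
      exact ih (hg.2 w hw')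
  refine ⟨hgood, hrank, fun z q2 hz hzq2 q => ⟨fun h' => ?_, fun h => h ▸ hfwd z q2 hzq2 hz⟩⟩
  exact pvRootsTo_unique h' (hfwd z q2 hzq2 hz)

theorem pvWrap_inR (N : Nat) (x : Int) (h1 : -(N:Int) ≤ x) (h2 : x < N) :
    pvInR N (pvWrap N x) := by
  unfold pvWrap pvInR
  split <;> omega

theorem pvVal_map (label : List Int) (N : Nat) (g : Int → Int) (z : Int)
    (hlen : label.length = N) (hz : pvInR N z) :
    pvVal (label.map g) z = g (pvVal label z) := by
  obtain ⟨hz1, hz2⟩ := hz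
  unfold pvVal
  rw [PySem.List.pyGetD_eq_getElem _ _ hz1 (by simp; omega),
      PySem.List.pyGetD_eq_getElem _ _ hz1 (by omega)]
  rw [List.getElem_map]

theorem collapse_iff (ra' rb' t u : Int) (_hne : ra' ≠ rb') :
    ((if t = rb' then ra' else t) = (if u = rb' then ra' else u)) ↔
      (t = u ∨ ((t = ra' ∨ t = rb') ∧ (u = ra' ∨ u = rb'))) := by
  split_ifs <;> omega

theorem ufUnion_reduce (p s : List Int) (c a b : Int) (N : Nat) (hpl : p.length = N)
    (hl2 : (ufFind N p a).2.length = N) :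
    ufUnion p s c a b =
      (if (ufFind N p a).1 = (ufFind N (ufFind N p a).2 b).1
       then (false, (ufFind N (ufFind N p a).2 b).2, s, c)
       else
        (true,
         PySem.List.pySetD (ufFind N (ufFind N p a).2 b).2
           (if PySem.List.pyGetD s (ufFind N p a).1 0 < PySem.List.pyGetD s (ufFind N (ufFind N p a).2 b).1 0
            then (ufFind N p a).1 else (ufFind N (ufFind N p a).2 b).1)
           (if PySem.List.pyGetD s (ufFind N p a).1 0 < PySem.List.pyGetD s (ufFind N (ufFind N p a).2 b).1 0
            then (ufFind N (ufFind N p a).2 b).1 else (ufFind N p a).1),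
         PySem.List.pySetD s
           (if PySem.List.pyGetD s (ufFind N p a).1 0 < PySem.List.pyGetD s (ufFind N (ufFind N p a).2 b).1 0
            then (ufFind N (ufFind N p a).2 b).1 else (ufFind N p a).1)
           (PySem.List.pyGetD s
             (if PySem.List.pyGetD s (ufFind N p a).1 0 < PySem.List.pyGetD s (ufFind N (ufFind N p a).2 b).1 0
              then (ufFind N (ufFind N p a).2 b).1 else (ufFind N p a).1) 0 +
            PySem.List.pyGetD s
             (if PySem.List.pyGetD s (ufFind N p a).1 0 < PySem.List.pyGetD s (ufFind N (ufFind N p a).2 b).1 0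
              then (ufFind N p a).1 else (ufFind N (ufFind N p a).2 b).1) 0),
         c - 1)) := by
  subst hpl
  show (if (ufFind p.length p a).1 = (ufFind (ufFind p.length p a).2.length (ufFind p.length p a).2 b).1
       then (false, (ufFind (ufFind p.length p a).2.length (ufFind p.length p a).2 b).2, s, c)
       else
        (true,
         PySem.List.pySetD (ufFind (ufFind p.length p a).2.length (ufFind p.length p a).2 b).2
           (if PySem.List.pyGetD s (ufFind p.length p a).1 0 < PySem.List.pyGetD s (ufFind (ufFind p.length p a).2.length (ufFind p.length p a).2 b).1 0
            then (ufFind p.length p a).1 else (ufFind (ufFind p.length p a).2.length (ufFind p.length p a).2 b).1)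
           (if PySem.List.pyGetD s (ufFind p.length p a).1 0 < PySem.List.pyGetD s (ufFind (ufFind p.length p a).2.length (ufFind p.length p a).2 b).1 0
            then (ufFind (ufFind p.length p a).2.length (ufFind p.length p a).2 b).1 else (ufFind p.length p a).1),
         PySem.List.pySetD s
           (if PySem.List.pyGetD s (ufFind p.length p a).1 0 < PySem.List.pyGetD s (ufFind (ufFind p.length p a).2.length (ufFind p.length p a).2 b).1 0
            then (ufFind (ufFind p.length p a).2.length (ufFind p.length p a).2 b).1 else (ufFind p.length p a).1)
           (PySem.List.pyGetD s
             (if PySem.List.pyGetD s (ufFind p.length p a).1 0 < PySem.List.pyGetD s (ufFind (ufFind p.length p a).2.length (ufFind p.length p a).2 b).1 0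
              then (ufFind (ufFind p.length p a).2.length (ufFind p.length p a).2 b).1 else (ufFind p.length p a).1) 0 +
            PySem.List.pyGetD s
             (if PySem.List.pyGetD s (ufFind p.length p a).1 0 < PySem.List.pyGetD s (ufFind (ufFind p.length p a).2.length (ufFind p.length p a).2 b).1 0
              then (ufFind p.length p a).1 else (ufFind (ufFind p.length p a).2.length (ufFind p.length p a).2 b).1) 0),
         c - 1)) = _
  rw [hl2]

theorem ufUnion_spec {N : Nat} {p s label : List Int} {c a b : Int}
    (h2 : 2 ≤ N) (hs : pvSim N p label)
    (ha1 : -(N:Int) ≤ a) (ha2 : a < N) (hb1 : -(N:Int) ≤ b) (hb2 : b < N) :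
    (pvVal label (pvWrap N a) = pvVal label (pvWrap N b) →
      (ufUnion p s c a b).1 = false ∧ (ufUnion p s c a b).2.2.2 = c ∧
      pvSim N (ufUnion p s c a b).2.1 label) ∧
    (pvVal label (pvWrap N a) ≠ pvVal label (pvWrap N b) →
      (ufUnion p s c a b).1 = true ∧ (ufUnion p s c a b).2.2.2 = c - 1 ∧
      pvSim N (ufUnion p s c a b).2.1
        (label.map (fun v => if v = pvVal label (pvWrap N b) then pvVal label (pvWrap N a) else v))) := by
  obtain ⟨hg, ⟨ρ, hr⟩, hlab, hiff⟩ := hs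
  have hwa : pvInR N (pvWrap N a) := pvWrap_inR N a ha1 ha2
  have hwb : pvInR N (pvWrap N b) := pvWrap_inR N b hb1 hb2
  obtain ⟨hA, g1, r1, iff1⟩ := ufFind_spec (ρ := ρ) h2 hg hr ha1 ha2
  obtain ⟨hB2, g2, r2, iff2⟩ := ufFind_spec (ρ := ρ) (p := (ufFind N p a).2) h2 g1 r1 hb1 hb2
  have hu := ufUnion_reduce p s c a b N hg.1 g1.1
  have hiffP2 : ∀ z q, pvInR N z →
      (pvRootsTo (ufFind N (ufFind N p a).2 b).2 z q ↔ pvRootsTo p z q) :=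
    fun z q hz => (iff2 z q hz).trans (iff1 z q hz)
  have hBp : pvRootsTo p (pvWrap N b) (ufFind N (ufFind N p a).2 b).1 :=
    (iff1 _ _ hwb).1 hB2
  have hRa : pvInR N (ufFind N p a).1 := pvRootsTo_inR hg hwa hA
  have hRb : pvInR N (ufFind N (ufFind N p a).2 b).1 := pvRootsTo_inR hg hwb hBp
  have hatomA : ∀ z q, pvInR N z → pvRootsTo p z q →
      (q = (ufFind N p a).1 ↔ pvVal label z = pvVal label (pvWrap N a)) := by
    intro z q hz hzq
    constructor
    · intro hq
      exact (hiff z _ hz hwa).1 ⟨_, hq ▸ hzq, hA⟩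
    · intro hl
      obtain ⟨q0, h1, h2⟩ := (hiff z _ hz hwa).2 hl
      rw [pvRootsTo_unique hzq h1]
      exact pvRootsTo_unique h2 hA
  have hatomB : ∀ z q, pvInR N z → pvRootsTo p z q →
      (q = (ufFind N (ufFind N p a).2 b).1 ↔ pvVal label z = pvVal label (pvWrap N b)) := by
    intro z q hz hzq
    constructor
    · intro hq
      exact (hiff z _ hz hwb).1 ⟨_, hq ▸ hzq, hBp⟩
    · intro hl
      obtain ⟨q0, h1, h2⟩ := (hiff z _ hz hwb).2 hl
      rw [pvRootsTo_unique hzq h1]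
      exact pvRootsTo_unique h2 hBp
  have heqiff : (ufFind N p a).1 = (ufFind N (ufFind N p a).2 b).1 ↔
      pvVal label (pvWrap N a) = pvVal label (pvWrap N b) :=
    hatomB _ _ hwa hA
  constructor
  · -- labels equal: nothing merged
    intro hlabeq
    have hEq := heqiff.2 hlabeq
    rw [hu, if_pos hEq]
    refine ⟨rfl, rfl, g2, ⟨ρ, r2⟩, hlab, fun x y hx hy => ?_⟩
    refine (Iff.trans ?_ (hiff x y hx hy))
    exact exists_congr fun q => and_congr (hiffP2 x q hx) (hiffP2 y q hy)
  · -- labels differ: merge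
    intro hlabne
    have hNe : (ufFind N p a).1 ≠ (ufFind N (ufFind N p a).2 b).1 :=
      fun h => hlabne (heqiff.1 h)
    rw [hu, if_neg hNe]
    refine ⟨rfl, rfl, ?_⟩
    have hfixA : pvVal (ufFind N (ufFind N p a).2 b).2 (ufFind N p a).1 = (ufFind N p a).1 :=
      pvRootsTo_fix ((hiffP2 _ _ hwa).2 hA)
    have hfixB : pvVal (ufFind N (ufFind N p a).2 b).2 (ufFind N (ufFind N p a).2 b).1 =
        (ufFind N (ufFind N p a).2 b).1 :=
      pvRootsTo_fix ((iff2 _ _ hwb).2 hB2)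
    -- the size comparison only swaps which root survives
    obtain ⟨ra', rb', hres, hperm⟩ :
        ∃ ra' rb',
          ((if PySem.List.pyGetD s (ufFind N p a).1 0 < PySem.List.pyGetD s (ufFind N (ufFind N p a).2 b).1 0
             then (ufFind N (ufFind N p a).2 b).1 else (ufFind N p a).1) = ra' ∧
           (if PySem.List.pyGetD s (ufFind N p a).1 0 < PySem.List.pyGetD s (ufFind N (ufFind N p a).2 b).1 0
             then (ufFind N p a).1 else (ufFind N (ufFind N p a).2 b).1) = rb') ∧
          ((ra' = (ufFind N p a).1 ∧ rb' = (ufFind N (ufFind N p a).2 b).1) ∨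
           (ra' = (ufFind N (ufFind N p a).2 b).1 ∧ rb' = (ufFind N p a).1)) := by
      by_cases hsz : PySem.List.pyGetD s (ufFind N p a).1 0 < PySem.List.pyGetD s (ufFind N (ufFind N p a).2 b).1 0
      · exact ⟨_, _, ⟨if_pos hsz, if_pos hsz⟩, Or.inr ⟨rfl, rfl⟩⟩
      · exact ⟨_, _, ⟨if_neg hsz, if_neg hsz⟩, Or.inl ⟨rfl, rfl⟩⟩
    rw [hres.2, hres.1]
    have hra' : pvInR N ra' := by rcases hperm with ⟨h1, _⟩ | ⟨h1, _⟩ <;> rw [h1] <;> assumption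
    have hrb' : pvInR N rb' := by rcases hperm with ⟨_, h1⟩ | ⟨_, h1⟩ <;> rw [h1] <;> assumption
    have hfixa' : pvVal (ufFind N (ufFind N p a).2 b).2 ra' = ra' := by
      rcases hperm with ⟨h1, _⟩ | ⟨h1, _⟩ <;> rw [h1] <;> assumption
    have hfixb' : pvVal (ufFind N (ufFind N p a).2 b).2 rb' = rb' := by
      rcases hperm with ⟨_, h1⟩ | ⟨_, h1⟩ <;> rw [h1] <;> assumption
    have hne' : ra' ≠ rb' := by
      rcases hperm with ⟨h1, h2⟩ | ⟨h1, h2⟩ <;> rw [h1, h2]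
      · exact hNe
      · exact fun h => hNe h.symm
    obtain ⟨g3, hex3, char⟩ := pvLink g2 r2 hra' hrb' hfixa' hfixb' hne'
    refine ⟨g3, hex3, by rw [List.length_map]; exact hlab, fun x y hx hy => ?_⟩
    obtain ⟨qx, hqx⟩ := pvRootsTo_exists g2 r2 hx
    obtain ⟨qy, hqy⟩ := pvRootsTo_exists g2 r2 hy
    have hqxp : pvRootsTo p x qx := (hiffP2 x qx hx).1 hqx
    have hqyp : pvRootsTo p y qy := (hiffP2 y qy hy).1 hqy
    have hL : (∃ q, pvRootsTo (PySem.List.pySetD (ufFind N (ufFind N p a).2 b).2 rb' ra') x q ∧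
          pvRootsTo (PySem.List.pySetD (ufFind N (ufFind N p a).2 b).2 rb' ra') y q) ↔
        ((if qx = rb' then ra' else qx) = (if qy = rb' then ra' else qy)) := by
      constructor
      · rintro ⟨q, h1, h2⟩
        rw [← (char x qx hx hqx q).1 h1, ← (char y qy hy hqy q).1 h2]
      · intro h
        exact ⟨_, (char x qx hx hqx _).2 rfl, (char y qy hy hqy _).2 h⟩
    rw [hL, collapse_iff _ _ _ _ hne']
    have e1 : qx = qy ↔ pvVal label x = pvVal label y := by
      constructor
      · intro h
        exact (hiff x y hx hy).1 ⟨qx, hqxp, h ▸ hqyp⟩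
      · intro h
        obtain ⟨q0, h1, h2⟩ := (hiff x y hx hy).2 h
        rw [pvRootsTo_unique hqxp h1, pvRootsTo_unique hqyp h2]
    have eset : ∀ z qz, pvInR N z → pvRootsTo p z qz →
        ((qz = ra' ∨ qz = rb') ↔
          (pvVal label z = pvVal label (pvWrap N a) ∨ pvVal label z = pvVal label (pvWrap N b))) := by
      intro z qz hz hzq
      rcases hperm with ⟨h1, h2⟩ | ⟨h1, h2⟩ <;> rw [h1, h2]
      · exact or_congr (hatomA z qz hz hzq) (hatomB z qz hz hzq)
      · exact (or_comm.trans (or_congr (hatomA z qz hz hzq) (hatomB z qz hz hzq)))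
    rw [e1, eset x qx hx hqxp, eset y qy hy hqyp]
    rw [pvVal_map label N _ x hlab hx, pvVal_map label N _ y hlab hy]
    split_ifs <;> omega

theorem pvVal_wrap' (label : List Int) (N : Nat) (x : Int) (hlen : label.length = N)
    (h1 : -(N:Int) ≤ x) (_h2 : x < N) : pvVal label x = pvVal label (pvWrap N x) := by
  unfold pvWrap
  split
  · exact pvVal_wrap label N x hlen h1 (by assumption)
  · rfl

theorem loop_eq {N : Nat} (h2 : 2 ≤ N) :
    ∀ (ls : List (List Int)) (p s label : List Int) (c : Int), pvSim N p label →
    (∀ l ∈ ls, l.length = 3 ∧ -(N:Int) ≤ l.getD 1 0 ∧ l.getD 1 0 < N ∧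
      -(N:Int) ≤ l.getD 2 0 ∧ l.getD 2 0 < N) →
    ufLoop ls p s c = relabelLoop ls label c := by
  intro ls
  induction ls with
  | nil => intro p s label c _ _; rfl
  | cons l rest ih =>
    intro p s label c hsim htr
    obtain ⟨hlen3, ha1, ha2, hb1, hb2⟩ := htr l (List.mem_cons_self)
    have hgA : PySem.List.pyGetD l 1 0 = l.getD 1 0 := PySem.List.pyGetD_ofNat' l 1 0
    have hgB : PySem.List.pyGetD l 2 0 = l.getD 2 0 := PySem.List.pyGetD_ofNat' l 2 0
    have hlab : label.length = N := hsim.2.2.1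
    have hwa := pvVal_wrap' label N (l.getD 1 0) hlab ha1 ha2
    have hwb := pvVal_wrap' label N (l.getD 2 0) hlab hb1 hb2
    have hspec := ufUnion_spec (s := s) (c := c) h2 hsim ha1 ha2 hb1 hb2
    have hwa' : PySem.List.pyGetD label (l.getD 1 0) 0 = pvVal label (pvWrap N (l.getD 1 0)) := hwa
    have hwb' : PySem.List.pyGetD label (l.getD 2 0) 0 = pvVal label (pvWrap N (l.getD 2 0)) := hwb
    simp only [ufLoop, relabelLoop, hgA, hgB]
    rw [hwa', hwb']
    by_cases heq : pvVal label (pvWrap N (l.getD 1 0)) = pvVal label (pvWrap N (l.getD 2 0))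
    · obtain ⟨hm, hc, hsim'⟩ := hspec.1 heq
      rw [if_pos heq, if_neg (by rw [hm]; simp), hc]
      exact ih _ _ _ _ hsim' (fun l' hl' => htr l' (List.mem_cons_of_mem _ hl'))
    · obtain ⟨hm, hc, hsim'⟩ := hspec.2 heq
      rw [if_neg heq, hm, hc]
      by_cases hone : c - 1 = 1
      · rw [if_pos (by exact ⟨rfl, hone⟩), if_pos hone]
      · rw [if_neg (by rintro ⟨-, h⟩; exact hone h), if_neg hone]
        exact ih _ _ _ _ hsim' (fun l' hl' => htr l' (List.mem_cons_of_mem _ hl'))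

theorem sim_init (N : Nat) :
    pvSim N (PySem.List.pyRange 0 (N : Int) 1) (PySem.List.pyRange 0 (N : Int) 1) := by
  have hlen : (PySem.List.pyRange 0 (N:Int) 1).length = N := by
    rw [PySem.List.length_pyRange_one]
    omega
  have hval : ∀ z : Int, pvInR N z → pvVal (PySem.List.pyRange 0 (N:Int) 1) z = z := by
    intro z hz
    obtain ⟨hz1, hz2⟩ := hz
    unfold pvVal
    rw [PySem.List.pyGetD_eq_getElem _ _ hz1 (by omega)]
    rw [PySem.List.getElem_pyRange_one]
    omega
  have hroot : ∀ z q : Int, pvInR N z →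
      (pvRootsTo (PySem.List.pyRange 0 (N:Int) 1) z q ↔ q = z) := by
    intro z q hz
    constructor
    · intro h
      exact pvRootsTo_unique h (.root z (hval z hz))
    · intro h
      rw [h]
      exact .root z (hval z hz)
  refine ⟨⟨hlen, fun z hz => by rw [hval z hz]; exact hz⟩,
    ⟨fun _ => 0, fun z hz hne => absurd (hval z hz) hne⟩, hlen, fun x y hx hy => ?_⟩
  rw [hval x hx, hval y hy]
  constructor
  · rintro ⟨q, h1, h2⟩
    rw [← (hroot x q hx).1 h1, ← (hroot y q hy).1 h2]
  · intro h
    exact ⟨x, (hroot x x hx).2 rfl, (hroot y x hy).2 h⟩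

-- ===== VERDICT (by name: the statement is the Claim_ definition above) =====
theorem earliest_full_connection_spec : Claim_equal_earliest_full_connection := by
  intro n logs _ hpre
  unfold Spec_earliest_full_connection earliest_full_connection earliest_full_connection_alt
  by_cases hn : n ≤ 1
  · simp [hn]
  · simp only [hn, if_false]
    set N := n.toNat with hN
    have hnN : (N : Int) = n := by omega
    have h2 : 2 ≤ N := by omega
    have hpre' : ∀ l ∈ logs, l.length = 3 ∧ -(N:Int) ≤ l.getD 1 0 ∧ l.getD 1 0 < N ∧
        -(N:Int) ≤ l.getD 2 0 ∧ l.getD 2 0 < N := by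
      rcases hpre with h | h
      · omega
      · intro l hl; have := h l hl; rw [hnN]; exact this
    rw [← hnN]
    refine loop_eq h2 _ _ _ _ _ (by simpa using sim_init N) ?_
    intro l hl
    exact hpre' l ((PySem.List.mem_sorted _ _ _ _).1 hl)
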